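-- pv_equiv track=rewrite | github.com/CarlosRobinDeCloet/Computer-Science-For-Business-Adminstration | AssignmentCopyMetBootstrapping.py | split_signatureMatrix
-- ===== SOURCE A (Python) =====
-- def split_signatureMatrix(signature, b: int):
--     assert len(signature) % b == 0
--     r = int(len(signature)/b)
--
--     splittedColumns = []
--
--     for c in range(len(signature[0])):
--         splittedColumns.append([])
--         colNum = 0
--         for i in range(0, len(signature), r):
--             splittedColumns[c].append([])
--             for j in range(i,i+r):
--                 splittedColumns[c][colNum].append(int(signature[j][c]))
--             colNum = colNum + 1
--     return splittedColumns
-- ===== SOURCE B (Python) =====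
-- def split_signatureMatrix(signature, b: int):
--     assert len(signature) % b == 0
--     r = int(len(signature)/b)
--
--     result = []
--     for c in range(len(signature[0])):
--         col = [int(signature[j][c]) for j in range(len(signature))]
--         result.append([col[i:i+r] for i in range(0, len(signature), r)])
--     return result
-- ===== Notes on version B (the rewrite author's own statement) =====
-- stated objective: simpler
-- what changed: Replaces the three interleaved loops with a manual colNum counter and in-place list indexing by an extract-column-then-chunk decomposition: each column is materialized once as a comprehension and then partitioned into bands by slicing.
-- outside the precondition, e.g. on split_signatureMatrix([[1, 2], [3]], -2): A returns [[], []], B raises IndexError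
import Mathlib
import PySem

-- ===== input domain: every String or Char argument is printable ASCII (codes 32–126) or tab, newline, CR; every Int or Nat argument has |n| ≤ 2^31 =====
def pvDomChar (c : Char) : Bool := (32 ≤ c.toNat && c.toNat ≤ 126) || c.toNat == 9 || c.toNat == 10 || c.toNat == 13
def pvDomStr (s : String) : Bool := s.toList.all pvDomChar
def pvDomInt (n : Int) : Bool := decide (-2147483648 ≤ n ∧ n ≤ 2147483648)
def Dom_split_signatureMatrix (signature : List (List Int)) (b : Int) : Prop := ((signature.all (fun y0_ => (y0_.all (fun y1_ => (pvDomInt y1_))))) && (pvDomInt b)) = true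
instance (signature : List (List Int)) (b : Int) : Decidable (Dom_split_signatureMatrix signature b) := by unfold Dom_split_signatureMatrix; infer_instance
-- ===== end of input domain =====

-- B replaces A's three interleaved loops with manual counters by an extract-column-then-chunk-by-slicing decomposition (same cost, simpler).

-- ===== PORT A =====
-- Literal port of A: nested loops appending; r = int(n/b) equals floor division on every
-- input the claim covers (Pre_ gives b ∣ n, so n/b is exact).
def split_signatureMatrix (signature : List (List Int)) (b : Int) : List (List (List Int)) :=
  let n : Int := signature.length
  let r : Int := PySem.Int.floordiv n b
  (PySem.List.pyRange 0 ((PySem.List.pyGetD signature 0 []).length : Int) 1).foldl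
    (fun splittedColumns c =>
      splittedColumns ++
        [ (PySem.List.pyRange 0 n r).foldl
            (fun colAcc i =>
              colAcc ++
                [ (PySem.List.pyRange i (i + r) 1).foldl
                    (fun band j =>
                      band ++ [ PySem.List.pyGetD (PySem.List.pyGetD signature j []) c 0 ])
                    [] ])
            [] ])
    []

-- ===== PORT B =====
-- Literal port of B: per column, materialize the column, then chunk it by slicing.
def split_signatureMatrix_alt (signature : List (List Int)) (b : Int) : List (List (List Int)) :=
  let n : Int := signature.length
  let r : Int := PySem.Int.floordiv n b
  (PySem.List.pyRange 0 ((PySem.List.pyGetD signature 0 []).length : Int) 1).map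
    (fun c =>
      let col : List Int :=
        (PySem.List.pyRange 0 n 1).map
          (fun j => PySem.List.pyGetD (PySem.List.pyGetD signature j []) c 0)
      (PySem.List.pyRange 0 n r).map (fun i => PySem.List.slice col (some i) (some (i + r))))

-- ===== PRECONDITION & SPEC =====
-- Pre_ excludes exactly: inputs where A raises (empty matrix → IndexError on signature[0];
-- b ∤ len → AssertionError; ragged rows with b > 0 → IndexError), plus ragged rows with
-- b < 0, on which A returns empty bands without touching the rows but B's column
-- comprehension raises IndexError (see cites in claim.json).
def Pre_split_signatureMatrix (signature : List (List Int)) (b : Int) : Prop :=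
  signature ≠ [] ∧ b ∣ (signature.length : Int) ∧
    ∀ row ∈ signature, (signature.headI).length ≤ row.length
instance (signature : List (List Int)) (b : Int) : Decidable (Pre_split_signatureMatrix signature b) := by unfold Pre_split_signatureMatrix; infer_instance

def pvWitness_split_signatureMatrix : List (List Int) × Int := ([[1, 2], [3, 4], [5, 6], [7, 8]], 2)

def Spec_split_signatureMatrix (signature : List (List Int)) (b : Int) (out : List (List (List Int))) : Prop := out = split_signatureMatrix_alt signature b
instance (signature : List (List Int)) (b : Int) (out : List (List (List Int))) : Decidable (Spec_split_signatureMatrix signature b out) := by unfold Spec_split_signatureMatrix; infer_instance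

-- ===== CLAIM (what is proved, stated in full; the proofs are below) =====
def Claim_equal_split_signatureMatrix : Prop := ∀ (signature : List (List Int)) (b : Int), Dom_split_signatureMatrix signature b → Pre_split_signatureMatrix signature b → Spec_split_signatureMatrix signature b (split_signatureMatrix signature b)

-- ===== LEMMAS AND PROOFS =====

theorem pyRange_eq_nil_of_neg_step {n r : Int} (hr : r < 0) (hn : 0 ≤ n) :
    PySem.List.pyRange 0 n r = [] := by
  simp [PySem.List.pyRange]
  intro h1
  split_ifs with h2 h3 <;> omega

theorem map_pyRange_eq_slice_col {α : Type} (g : Int → α) (n i r : Int)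
    (h0 : 0 ≤ i) (hr : 0 < r) (hn : i + r ≤ n) :
    (PySem.List.pyRange i (i + r) 1).map g =
      PySem.List.slice ((PySem.List.pyRange 0 n 1).map g) (some i) (some (i + r)) := by
  have hlen : ((PySem.List.pyRange 0 n 1).map g).length = n.toNat := by
    simp [PySem.List.pyRange_one]
  rw [PySem.List.slice_of_nonneg _ h0 (by omega) (by rw [hlen]; omega) (by rw [hlen]; omega)]
  apply List.ext_getElem
  · simp [PySem.List.pyRange_one]
    omega
  · intro k hk1 hk2
    simp only [PySem.List.pyRange_one, List.getElem_map, List.getElem_take, List.getElem_drop,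
      List.getElem_range]
    congr 1
    simp at hk1
    omega

theorem ports_eq (signature : List (List Int)) (b : Int)
    (hdvd : b ∣ (signature.length : Int)) :
    split_signatureMatrix signature b = split_signatureMatrix_alt signature b := by
  unfold split_signatureMatrix split_signatureMatrix_alt
  rw [PySem.List.foldl_append_singleton_eq_map, List.nil_append]
  apply List.map_congr_left
  intro c _hc
  rw [PySem.List.foldl_append_singleton_eq_map, List.nil_append]
  rcases lt_trichotomy (PySem.Int.floordiv (signature.length : Int) b) 0 with hlt | heq | hgt
  · rw [pyRange_eq_nil_of_neg_step hlt (by positivity)]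
    simp
  · rw [heq]
    simp [PySem.List.pyRange]
  · have hmod : PySem.Int.mod (signature.length : Int) b = 0 :=
      (PySem.Int.mod_eq_zero_iff_dvd _ _).mpr hdvd
    have hmul := PySem.Int.floordiv_mul_add_mod (signature.length : Int) b
    have hrn : PySem.Int.floordiv (signature.length : Int) b ∣ (signature.length : Int) :=
      ⟨b, by omega⟩
    apply List.map_congr_left
    intro i hi
    rw [PySem.List.mem_pyRange_iff_of_pos hgt] at hi
    obtain ⟨h0, hin, hdi⟩ := hi
    rw [PySem.List.foldl_append_singleton_eq_map, List.nil_append]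
    apply map_pyRange_eq_slice_col
    · exact h0
    · exact hgt
    · have : PySem.Int.floordiv (signature.length : Int) b ∣ ((signature.length : Int) - i) :=
        dvd_sub hrn (by simpa using hdi)
      have := Int.le_of_dvd (by omega) this
      omega

-- ===== VERDICT (by name: the statement is the Claim_ definition above) =====
theorem split_signatureMatrix_spec : Claim_equal_split_signatureMatrix := by
  intro signature b _ hpre
  exact ports_eq signature b hpre.2.1
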